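-- pv_equiv track=rewrite | github.com/noahpicard/noahpicard.github.io | appear/translate_csv_falling_sections.py | combine_string_arrays_with_overlap
-- ===== SOURCE A (Python) =====
-- def combine_string_arrays_with_overlap(original, addition, overlap):
--   final = []
--   for index in range(max(0, len(original) + len(addition) - overlap)):
--     if index < len(original):
--       final.append(original[index])
--     else:
--       final.append("")
--
--     addition_index = index - (len(original) - overlap)
--     if addition_index >= 0:
--       final[index] += addition[addition_index]
--   return final
-- ===== SOURCE B (Python) =====
-- def combine_string_arrays_with_overlap(original, addition, overlap):
--     # Build the padded left and shifted right columns, then glue them pairwise.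
--     L = max(0, len(original) + len(addition) - overlap)
--     shift = len(original) - overlap
--     left = (original + [""] * L)[:L]
--     right = ([""] * shift + addition)[max(0, -shift):]
--     return [x + y for x, y in zip(left, right)]
-- ===== Notes on version B (the rewrite author's own statement) =====
-- stated objective: alternative
-- what changed: Replaces A's single interleaved index loop (append then in-place concatenation onto the last slot) with a slice/zip formulation: pad original to the output length, shift addition by len(original)-overlap using list replication and slicing, and zip-concatenate the two columns.
import Mathlib
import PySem

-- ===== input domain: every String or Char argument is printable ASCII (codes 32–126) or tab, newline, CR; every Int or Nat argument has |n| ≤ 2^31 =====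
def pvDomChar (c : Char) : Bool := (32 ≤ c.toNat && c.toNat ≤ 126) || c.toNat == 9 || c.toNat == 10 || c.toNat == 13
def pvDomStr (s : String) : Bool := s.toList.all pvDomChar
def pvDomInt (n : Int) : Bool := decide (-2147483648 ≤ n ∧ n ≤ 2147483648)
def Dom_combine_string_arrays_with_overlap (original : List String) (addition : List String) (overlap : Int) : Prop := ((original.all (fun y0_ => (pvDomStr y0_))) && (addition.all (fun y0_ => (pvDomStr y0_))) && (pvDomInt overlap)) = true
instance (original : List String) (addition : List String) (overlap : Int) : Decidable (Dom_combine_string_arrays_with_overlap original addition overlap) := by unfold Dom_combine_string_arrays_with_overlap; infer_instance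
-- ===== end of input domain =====

-- B replaces A's single interleaved index loop (append, then in-place += on the last slot)
-- with a slice/zip formulation: pad original to the output length, shift addition via
-- replication + slicing, and zip-concatenate the two columns (objective: alternative).

-- ===== PORT A =====
-- literal transliteration of A's loop; both list indexings are provably in range, so
-- pyGetD with default "" is exact here
def combine_string_arrays_with_overlap (original : List String) (addition : List String) (overlap : Int) : List String :=
  (PySem.List.pyRange 0 (max 0 ((original.length : Int) + (addition.length : Int) - overlap)) 1).foldl
    (fun final index =>
      let final := final ++ [if index < (original.length : Int) then PySem.List.pyGetD original index "" else ""]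
      let addition_index := index - ((original.length : Int) - overlap)
      if 0 ≤ addition_index then
        final.set index.toNat ((final.getD index.toNat "") ++ PySem.List.pyGetD addition addition_index "")
      else final)
    []

-- ===== PORT B =====
def combine_string_arrays_with_overlap_alt (original : List String) (addition : List String) (overlap : Int) : List String :=
  let L : Int := max 0 ((original.length : Int) + (addition.length : Int) - overlap)
  let shift : Int := (original.length : Int) - overlap
  let left := PySem.List.slice (original ++ List.replicate L.toNat "") none (some L)
  let right := PySem.List.slice (List.replicate shift.toNat "" ++ addition) (some (max 0 (-shift))) none
  (left.zip right).map (fun p => p.1 ++ p.2)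

-- ===== PRECONDITION & SPEC =====
def Spec_combine_string_arrays_with_overlap (original : List String) (addition : List String) (overlap : Int) (out : List String) : Prop := out = combine_string_arrays_with_overlap_alt original addition overlap
instance (original : List String) (addition : List String) (overlap : Int) (out : List String) : Decidable (Spec_combine_string_arrays_with_overlap original addition overlap out) := by unfold Spec_combine_string_arrays_with_overlap; infer_instance

-- ===== CLAIM (what is proved, stated in full; the proofs are below) =====
def Claim_equal_combine_string_arrays_with_overlap : Prop := ∀ (original : List String) (addition : List String) (overlap : Int), Dom_combine_string_arrays_with_overlap original addition overlap → Spec_combine_string_arrays_with_overlap original addition overlap (combine_string_arrays_with_overlap original addition overlap)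

-- ===== LEMMAS AND PROOFS =====

-- the common closed form: entry k of the result
def pvEntry (original : List String) (addition : List String) (overlap : Int) (k : Nat) : String :=
  (if (k : Int) < (original.length : Int) then PySem.List.pyGetD original (k : Int) "" else "") ++
  (if 0 ≤ (k : Int) - ((original.length : Int) - overlap) then
      PySem.List.pyGetD addition ((k : Int) - ((original.length : Int) - overlap)) ""
   else "")

theorem pv_last_step (l : List String) (x y : String) (k : Nat) (h : l.length = k) :
    (l ++ [x]).set k ((l ++ [x]).getD k "" ++ y) = l ++ [x ++ y] := by
  subst h
  induction l with
  | nil => simp [List.getD]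
  | cons a t ih => simpa [List.getD] using ih

theorem pvA_eq_map (original addition : List String) (overlap : Int) :
    combine_string_arrays_with_overlap original addition overlap
      = (List.range (max 0 ((original.length : Int) + (addition.length : Int) - overlap)).toNat).map
          (pvEntry original addition overlap) := by
  unfold combine_string_arrays_with_overlap
  rw [PySem.List.pyRange_one]
  have h : ((max 0 ((original.length : Int) + (addition.length : Int) - overlap)) - 0).toNat
      = (max 0 ((original.length : Int) + (addition.length : Int) - overlap)).toNat := by omega
  rw [h]
  generalize (max 0 ((original.length : Int) + (addition.length : Int) - overlap)).toNat = N
  induction N with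
  | zero => simp
  | succ n ih =>
      rw [List.range_succ, List.map_append, List.map_append, List.foldl_append, ih]
      simp only [List.map_cons, List.map_nil, List.foldl_cons, List.foldl_nil, zero_add]
      have hlen : ((List.range n).map (pvEntry original addition overlap)).length = n := by simp
      have ht : ((n : Nat) : Int).toNat = n := by omega
      by_cases hc : 0 ≤ (n : Int) - ((original.length : Int) - overlap)
      · rw [if_pos hc, ht, pv_last_step _ _ _ _ hlen]
        congr 1
        simp only [pvEntry, if_pos hc]
      · rw [if_neg hc]
        congr 1
        simp only [pvEntry, if_neg hc, String.append_empty]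

theorem pvB_eq_map (original addition : List String) (overlap : Int) :
    combine_string_arrays_with_overlap_alt original addition overlap
      = (List.range (max 0 ((original.length : Int) + (addition.length : Int) - overlap)).toNat).map
          (pvEntry original addition overlap) := by
  simp only [combine_string_arrays_with_overlap_alt]
  set n : Int := (original.length : Int) with hn
  set m : Int := (addition.length : Int) with hm
  set L : Int := max 0 (n + m - overlap) with hL
  set S : Int := n - overlap with hS
  have hL0 : 0 ≤ L := by omega
  rw [PySem.List.slice_to _ hL0,
    PySem.List.slice_from (List.replicate S.toNat "" ++ addition) (a := max 0 (-S)) (by omega),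
    show (max 0 (-S)).toNat = (-S).toNat by omega]
  apply List.ext_getElem?
  intro k
  by_cases hk : k < L.toNat
  · -- both sides are `some`
    have hlv : (List.take L.toNat (original ++ List.replicate L.toNat ""))[k]?
        = some (if (k : Int) < n then PySem.List.pyGetD original (k : Int) "" else "") := by
      rw [List.getElem?_take, if_pos hk]
      by_cases hko : k < original.length
      · rw [List.getElem?_append_left hko, List.getElem?_eq_getElem hko, if_pos (by omega),
          PySem.List.pyGetD_eq_getElem original "" (by omega) (by omega)]
        simp
      · rw [List.getElem?_append_right (by omega), List.getElem?_replicate,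
          if_pos (by omega), if_neg (by omega)]
    have hrv : (List.drop (-S).toNat (List.replicate S.toNat "" ++ addition))[k]?
        = some (if 0 ≤ (k : Int) - S then PySem.List.pyGetD addition ((k : Int) - S) "" else "") := by
      rw [List.getElem?_drop]
      by_cases hSpos : 0 ≤ S
      · rw [show (-S).toNat = 0 by omega, Nat.zero_add]
        by_cases hks : k < S.toNat
        · rw [List.getElem?_append_left (by simp [hks]), List.getElem?_replicate,
            if_pos hks, if_neg (by omega)]
        · rw [List.getElem?_append_right (by simp; omega), List.length_replicate]
          have hlt : k - S.toNat < addition.length := by omega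
          rw [List.getElem?_eq_getElem hlt, if_pos (by omega),
            show (k : Int) - S = ((k - S.toNat : Nat) : Int) by omega,
            PySem.List.pyGetD_natCast, List.getD_eq_getElem addition "" hlt]
      · rw [show S.toNat = 0 by omega]
        simp only [List.replicate_zero, List.nil_append]
        have hlt : (-S).toNat + k < addition.length := by omega
        rw [List.getElem?_eq_getElem hlt, if_pos (by omega),
          show (k : Int) - S = (((-S).toNat + k : Nat) : Int) by omega,
          PySem.List.pyGetD_natCast, List.getD_eq_getElem addition "" hlt]
    have hzlt : k < ((List.take L.toNat (original ++ List.replicate L.toNat "")).zip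
        (List.drop (-S).toNat (List.replicate S.toNat "" ++ addition))).length := by
      simp only [List.length_zip, List.length_take, List.length_append, List.length_replicate,
        List.length_drop]
      omega
    rw [List.getElem?_map, List.getElem?_map, List.getElem?_eq_getElem hzlt, List.getElem_zip,
      List.getElem?_range hk]
    have e1 := hlv
    have e2 := hrv
    have hll : k < (List.take L.toNat (original ++ List.replicate L.toNat "")).length := by
      simp only [List.length_take, List.length_append, List.length_replicate]; omega
    have hrl : k < (List.drop (-S).toNat (List.replicate S.toNat "" ++ addition)).length := by
      simp only [List.length_drop, List.length_replicate, List.length_append]; omega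
    rw [List.getElem?_eq_getElem hll] at e1
    rw [List.getElem?_eq_getElem hrl] at e2
    simp only [Option.some.injEq] at e1 e2 ⊢
    rw [e1, e2]
    rfl
  · -- both sides are `none`
    have hl1 : (List.map (fun p : String × String => p.1 ++ p.2)
        ((List.take L.toNat (original ++ List.replicate L.toNat "")).zip
          (List.drop (-S).toNat (List.replicate S.toNat "" ++ addition)))).length ≤ k := by
      simp only [List.length_map, List.length_zip, List.length_take, List.length_append,
        List.length_replicate, List.length_drop]
      omega
    have hl2 : (List.map (pvEntry original addition overlap) (List.range L.toNat)).length ≤ k := by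
      simp only [List.length_map, List.length_range]; omega
    rw [List.getElem?_eq_none hl1, List.getElem?_eq_none hl2]

-- ===== VERDICT (by name: the statement is the Claim_ definition above) =====
theorem combine_string_arrays_with_overlap_spec : Claim_equal_combine_string_arrays_with_overlap := by
  intro original addition overlap _
  unfold Spec_combine_string_arrays_with_overlap
  rw [pvA_eq_map, pvB_eq_map]
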